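-- pv_equiv track=rewrite | github.com/anishfelixm/100daysofCP | python/57b_1629A_DownloadMoreRAM.py | solve
-- ===== SOURCE A (Python) =====
-- def solve(a, b, k, n):
--     arr = []
--     for i in range(n):
--         a[i] = int(a[i])
--         b[i] = int(b[i])
--         arr.append([a[i],b[i]])
--     arr.sort()
--     for i in range(n):
--         if arr[i][0] > k:
--             continue
--         else:
--             k += arr[i][1]
--     return k
-- ===== SOURCE B (Python) =====
-- def solve(a, b, k, n):
--     rem = [(int(a[i]), int(b[i])) for i in range(n)]
--     while rem:
--         p = min(rem)
--         rem.remove(p)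
--         if p[0] <= k:
--             k += p[1]
--     return k
-- ===== Notes on version B (the rewrite author's own statement) =====
-- stated objective: alternative
-- what changed: B drops the sort-then-scan: instead of building and sorting the full pair list and then scanning it, B repeatedly extracts the minimum remaining (requirement, gain) pair and applies it in one fused selection loop; B also does not mutate a and b in place.
import Mathlib
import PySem

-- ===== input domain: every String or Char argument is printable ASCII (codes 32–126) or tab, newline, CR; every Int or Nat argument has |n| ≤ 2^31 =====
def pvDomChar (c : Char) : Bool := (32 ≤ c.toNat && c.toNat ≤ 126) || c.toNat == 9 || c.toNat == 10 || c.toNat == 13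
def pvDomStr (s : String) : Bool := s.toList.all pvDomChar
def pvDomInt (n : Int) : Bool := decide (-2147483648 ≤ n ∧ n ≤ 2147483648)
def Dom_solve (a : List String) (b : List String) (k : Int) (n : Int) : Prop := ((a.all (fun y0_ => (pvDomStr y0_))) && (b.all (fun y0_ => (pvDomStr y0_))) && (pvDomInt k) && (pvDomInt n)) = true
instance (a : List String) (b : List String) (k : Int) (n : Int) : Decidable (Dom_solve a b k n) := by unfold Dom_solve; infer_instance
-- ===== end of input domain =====

-- B replaces A's sort-then-scan with a fused selection loop (repeatedly extract the minimum
-- remaining (requirement, gain) pair and apply it); equivalence is about the RETURN value only —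
-- A mutates a and b in place (int conversion), B does not.

-- ===== PORT A =====
-- A's first loop: convert a[i], b[i] to int and append the pair [a[i], b[i]].
def pvParseA (a : List String) (b : List String) (n : Int) : List (Int × Int) :=
  (PySem.List.pyRange 0 n 1).foldl (fun arr i =>
    match PySem.Int.ofStr? (PySem.List.pyGetD a i ""), PySem.Int.ofStr? (PySem.List.pyGetD b i "") with
    | some ai, some bi => arr ++ [(ai, bi)]
    | _, _ => arr) []

def solve (a : List String) (b : List String) (k : Int) (n : Int) : Int :=
  let arr := PySem.List.sorted2 (pvParseA a b n) (fun p => p.1) (fun p => p.2)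
  (PySem.List.pyRange 0 n 1).foldl (fun kk i =>
    if (PySem.List.pyGetD arr i ((0 : Int), (0 : Int))).1 > kk then kk
    else kk + (PySem.List.pyGetD arr i ((0 : Int), (0 : Int))).2) k

-- ===== PORT B =====
-- rem = [(int(a[i]), int(b[i])) for i in range(n)]
def pvParseB (a : List String) (b : List String) (n : Int) : List (Int × Int) :=
  (PySem.List.pyRange 0 n 1).map (fun i =>
    ((PySem.Int.ofStr? (PySem.List.pyGetD a i "")).getD 0,
     (PySem.Int.ofStr? (PySem.List.pyGetD b i "")).getD 0))

-- while rem: p = min(rem); rem.remove(p); if p[0] <= k: k += p[1]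
-- (each iteration removes one element, so fuel = initial length is exact)
def pvLoopB : Nat → List (Int × Int) → Int → Int
  | 0, _, k => k
  | fuel + 1, rem, k =>
    match PySem.List.min2? rem (fun p => p.1) (fun p => p.2) with
    | none => k
    | some p => pvLoopB fuel ((PySem.List.remove? rem p).getD []) (if p.1 ≤ k then k + p.2 else k)

def solve_alt (a : List String) (b : List String) (k : Int) (n : Int) : Int :=
  pvLoopB (pvParseB a b n).length (pvParseB a b n) k

-- ===== PRECONDITION & SPEC =====
-- Pre_ excludes exactly the inputs where A raises: an index i < n beyond a or b (IndexError),
-- or a string among the first n of a or b that int() rejects (ValueError).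
def Pre_solve (a : List String) (b : List String) (k : Int) (n : Int) : Prop :=
  n ≤ (a.length : Int) ∧ n ≤ (b.length : Int) ∧
  ∀ i < n.toNat, (PySem.Int.ofStr? (a.getD i "")).isSome = true ∧ (PySem.Int.ofStr? (b.getD i "")).isSome = true
instance (a : List String) (b : List String) (k : Int) (n : Int) : Decidable (Pre_solve a b k n) := by unfold Pre_solve; infer_instance

def pvWitness_solve : List String × List String × Int × Int := (["5", "1"], ["3", "2"], 2, 2)

def Spec_solve (a : List String) (b : List String) (k : Int) (n : Int) (out : Int) : Prop := out = solve_alt a b k n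
instance (a : List String) (b : List String) (k : Int) (n : Int) (out : Int) : Decidable (Spec_solve a b k n out) := by unfold Spec_solve; infer_instance

-- ===== CLAIM (what is proved, stated in full; the proofs are below) =====
def Claim_equal_solve : Prop := ∀ (a : List String) (b : List String) (k : Int) (n : Int), Dom_solve a b k n → Pre_solve a b k n → Spec_solve a b k n (solve a b k n)

-- ===== LEMMAS AND PROOFS =====

-- Python compares the 2-element lists [a[i], b[i]] lexicographically; pvKey names that order.
def pvKey : Int × Int → Lex (Int × Int) := fun p => toLex p

theorem pvBefore_eq (p q : Int × Int) :
    (decide (p.1 < q.1) || (!decide (q.1 < p.1) && decide (p.2 < q.2))) = decide (pvKey p < pvKey q) := by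
  rcases p with ⟨x1, x2⟩; rcases q with ⟨y1, y2⟩
  apply Bool.eq_iff_iff.mpr
  simp only [pvKey, Bool.or_eq_true, Bool.and_eq_true, Bool.not_eq_true', decide_eq_true_eq,
    decide_eq_false_iff_not, Prod.Lex.lt_iff]
  simp only [ofLex_toLex]
  omega

theorem pvSorted2_eq (l : List (Int × Int)) :
    PySem.List.sorted2 l (fun p => p.1) (fun p => p.2) = PySem.List.sorted l pvKey false := by
  simp only [PySem.List.sorted2, PySem.List.sorted]
  congr 1
  funext acc x
  congr 1
  funext u v
  exact pvBefore_eq u v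

theorem pvMin2_eq (l : List (Int × Int)) :
    PySem.List.min2? l (fun p => p.1) (fun p => p.2) = PySem.List.min? l pvKey := by
  simp only [PySem.List.min2?, PySem.List.min?]
  congr 1
  funext acc x
  cases acc with
  | none => rfl
  | some m =>
    dsimp only
    rw [pvBefore_eq]
    simp

theorem pvSorted_cons_min (l : List (Int × Int)) (m : Int × Int)
    (h : PySem.List.min? l pvKey = some m) :
    PySem.List.sorted l pvKey false = m :: PySem.List.sorted (l.erase m) pvKey false := by
  have hmem : m ∈ l := PySem.List.min?_mem h
  apply PySem.List.eq_of_perm_of_pairwise_le_of_injective pvKey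
  · exact fun x y hxy => toLex.injective hxy
  · exact ((PySem.List.sorted_perm l pvKey false).trans (List.perm_cons_erase hmem)).trans
      (List.Perm.cons m (PySem.List.sorted_perm (l.erase m) pvKey false).symm)
  · exact PySem.List.sorted_pairwise l pvKey
  · refine List.pairwise_cons.mpr ⟨?_, PySem.List.sorted_pairwise (l.erase m) pvKey⟩
    intro y hy
    exact PySem.List.min?_isMin h y (List.mem_of_mem_erase ((PySem.List.mem_sorted _ _ _ _).mp hy))

theorem pvLoopB_eq (fuel : Nat) : ∀ (l : List (Int × Int)) (k : Int), l.length ≤ fuel →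
    pvLoopB fuel l k =
      (PySem.List.sorted l pvKey false).foldl (fun kk p => if p.1 ≤ kk then kk + p.2 else kk) k := by
  induction fuel with
  | zero =>
    intro l k h
    have hl : l = [] := List.eq_nil_of_length_eq_zero (Nat.le_zero.mp h)
    subst hl; rfl
  | succ fuel ih =>
    intro l k h
    rw [pvLoopB, pvMin2_eq]
    cases hm : PySem.List.min? l pvKey with
    | none =>
      have hl : l = [] := (PySem.List.min?_eq_none_iff l pvKey).mp hm
      subst hl; rfl
    | some m =>
      have hmem : m ∈ l := PySem.List.min?_mem hm
      dsimp only
      rw [PySem.List.remove?_eq_some_erase l m hmem, Option.getD_some,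
        pvSorted_cons_min l m hm, List.foldl_cons]
      exact ih (l.erase m) _ (by have := List.length_erase_of_mem hmem; omega)

theorem pvParse_eq (a : List String) (b : List String) (n : Int)
    (h : ∀ i < n.toNat, (PySem.Int.ofStr? (a.getD i "")).isSome = true ∧ (PySem.Int.ofStr? (b.getD i "")).isSome = true) :
    pvParseA a b n = pvParseB a b n := by
  unfold pvParseA pvParseB
  rw [PySem.List.foldl_congr_mem _ _
    (fun arr i => arr ++ [((PySem.Int.ofStr? (PySem.List.pyGetD a i "")).getD 0,
                           (PySem.Int.ofStr? (PySem.List.pyGetD b i "")).getD 0)]) []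
    ?_]
  · exact PySem.List.foldl_append_singleton_eq_map _ _ []
  · intro acc i hi
    have hi' := (PySem.List.mem_pyRange_one).mp hi
    have hcast : i = ((i.toNat : Nat) : Int) := (Int.toNat_of_nonneg hi'.1).symm
    have hbnd : i.toNat < n.toNat := by omega
    obtain ⟨h1, h2⟩ := h i.toNat hbnd
    obtain ⟨ai, hai⟩ := Option.isSome_iff_exists.mp h1
    obtain ⟨bi, hbi⟩ := Option.isSome_iff_exists.mp h2
    rw [hcast]
    simp only [PySem.List.pyGetD_natCast, hai, hbi, Option.getD_some]

-- ===== VERDICT (by name: the statement is the Claim_ definition above) =====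
theorem solve_spec : Claim_equal_solve := by
  intro a b k n _hD hPre
  obtain ⟨ha, hb, h⟩ := hPre
  unfold Spec_solve solve solve_alt
  by_cases hn : 0 ≤ n
  · have hpa : pvParseA a b n = pvParseB a b n := pvParse_eq a b n h
    have hlen : (pvParseB a b n).length = n.toNat := by
      simp [pvParseB, PySem.List.length_pyRange_one]
    rw [hpa, pvSorted2_eq]
    have hlarr : ((PySem.List.sorted (pvParseB a b n) pvKey false).length : Int) = n := by
      have := (PySem.List.sorted_perm (pvParseB a b n) pvKey false).length_eq
      omega
    rw [show PySem.List.pyRange 0 n 1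
        = PySem.List.pyRange 0 ((PySem.List.sorted (pvParseB a b n) pvKey false).length : Int) 1
      from by rw [hlarr]]
    rw [PySem.List.foldl_pyRange_zero_pyGetD' (PySem.List.sorted (pvParseB a b n) pvKey false)
      ((0 : Int), (0 : Int)) (fun kk p => if p.1 > kk then kk else kk + p.2) k]
    rw [pvLoopB_eq (pvParseB a b n).length (pvParseB a b n) k le_rfl]
    apply PySem.List.foldl_congr_mem
    intro acc p _
    dsimp only
    split_ifs <;> omega
  · have hnil : PySem.List.pyRange 0 n 1 = [] := PySem.List.pyRange_one_eq_nil (by omega)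
    simp [pvParseB, pvLoopB, hnil]
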